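-- pv_equiv track=rewrite | github.com/jbkinney/mavenn | src/utils.py | seq2mat2
-- ===== SOURCE A (Python) =====
-- def seq2mat2(seq):
--     ''' returns which parameters are true for the sequence,
--         where each parameter is a possible pairing'''
--     pair_dict = {
--         'AA':0,'AC':1, 'AG':2,'AT':3,'CA':4,'CC':5,'CG':6,
--         'CT':7,'GA':8,'GC':9,'GG':10,'GT':11,'TA':12,'TC':13,'TG':14}
--     pairlist = []
--     lseq = len(seq)
--     index = 0
--     for i,bp in enumerate(seq):
--
--         for z in range(i+1,lseq):
--             if bp + seq[z] == 'TT':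
--                 continue
--             pairlist.append(index*15 + pair_dict[bp + seq[z]])
--             index = index +1
--     return pairlist
-- ===== SOURCE B (Python) =====
-- def seq2mat2(seq):
--     ''' returns which parameters are true for the sequence,
--         where each parameter is a possible pairing'''
--     base = {'A': 0, 'C': 1, 'G': 2, 'T': 3}
--     codes = []
--     tail = list(seq)
--     while tail:
--         a = tail.pop(0)
--         for b in tail:
--             codes.append(base[a] * 4 + base[b])
--     kept = [v for v in codes if v != 15]
--     return [15 * k + v for k, v in enumerate(kept)]
-- ===== Notes on version B (the rewrite author's own statement) =====
-- stated objective: alternative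
-- what changed: A threads a running counter through nested index loops and maps each pair through a 15-entry pair-string dict; B encodes single bases as 0..3 once, computes each pair's code arithmetically as 4*a+b with a head-popping queue loop (no index arithmetic, no pair dict), filters out code 15 (=TT) in a separate pass, and finally maps enumerate over the kept codes to 15*k+v.
import Mathlib
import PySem

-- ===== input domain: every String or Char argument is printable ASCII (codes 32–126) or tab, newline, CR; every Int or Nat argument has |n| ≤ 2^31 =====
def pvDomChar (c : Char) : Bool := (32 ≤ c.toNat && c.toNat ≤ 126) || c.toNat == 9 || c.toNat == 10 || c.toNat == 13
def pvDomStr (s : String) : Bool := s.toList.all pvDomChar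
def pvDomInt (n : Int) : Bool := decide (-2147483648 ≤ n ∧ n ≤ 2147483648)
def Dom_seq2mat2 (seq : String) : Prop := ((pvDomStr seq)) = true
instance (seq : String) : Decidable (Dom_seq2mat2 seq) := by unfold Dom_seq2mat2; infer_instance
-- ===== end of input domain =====

-- B replaces A's pair-string dict and manually-threaded counter by an arithmetic
-- base-4 pair encoding computed with a head-popping queue loop, a separate filter
-- of code 15 (= 'TT'), and a final enumerate-map (alternative; same O(n^2) cost).


-- ===== PORT A =====
def pairDict : PySem.Dict String Int := PySem.Dict.ofList
  [("AA",0),("AC",1),("AG",2),("AT",3),("CA",4),("CC",5),("CG",6),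
   ("CT",7),("GA",8),("GC",9),("GG",10),("GT",11),("TA",12),("TC",13),("TG",14)]

-- literal port of A: enumerate over seq, inner range(i+1, lseq), running `index` counter.
-- (under Pre_ every looked-up key is present, so Dict.getD's default is never returned)
def seq2mat2 (seq : String) : List Int :=
  let l := seq.toList
  let lseq : Int := l.length
  let st := (PySem.List.enumerate l).foldl
    (fun (st : List Int × Int) ib =>
      (PySem.List.pyRange (ib.1 + 1) lseq 1).foldl
        (fun (st : List Int × Int) z =>
          let pr := String.ofList [ib.2, PySem.List.pyGetD l z ' ']
          if pr = "TT" then st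
          else (st.1 ++ [st.2 * 15 + pairDict.getD pr 0], st.2 + 1))
        st)
    ([], 0)
  st.1

-- ===== PORT B =====
def baseDict : PySem.Dict Char Int := PySem.Dict.ofList [('A',0),('C',1),('G',2),('T',3)]

-- literal port of B's while-loop: `tail.pop(0)` then appending base[a]*4+base[b]
-- for each b of the remaining tail is exactly this structural recursion.
def altCodes : List Char → List Int
  | [] => []
  | a :: rest => rest.map (fun b => baseDict.getD a 0 * 4 + baseDict.getD b 0) ++ altCodes rest

def seq2mat2_alt (seq : String) : List Int :=
  let kept := (altCodes seq.toList).filter (fun v => v ≠ 15)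
  (PySem.List.enumerate kept).map (fun kv => 15 * kv.1 + kv.2)

-- ===== PRECONDITION & SPEC =====
-- Pre_ excludes exactly the inputs on which Python A raises KeyError: a string of
-- length ≥ 2 containing a character outside 'ACGT' (some pair is then missing from
-- pair_dict; B raises there too).
def Pre_seq2mat2 (seq : String) : Prop :=
  (seq.toList.length ≤ 1 || seq.toList.all (fun c => c == 'A' || c == 'C' || c == 'G' || c == 'T')) = true
instance (seq : String) : Decidable (Pre_seq2mat2 seq) := by unfold Pre_seq2mat2; infer_instance
def pvWitness_seq2mat2 : String := "ATGT"

def Spec_seq2mat2 (seq : String) (out : List Int) : Prop := out = seq2mat2_alt seq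
instance (seq : String) (out : List Int) : Decidable (Spec_seq2mat2 seq out) := by unfold Spec_seq2mat2; infer_instance

-- ===== CLAIM (what is proved, stated in full; the proofs are below) =====
def Claim_equal_seq2mat2 : Prop := ∀ (seq : String), Dom_seq2mat2 seq → Pre_seq2mat2 seq → Spec_seq2mat2 seq (seq2mat2 seq)

-- ===== LEMMAS AND PROOFS =====

-- the ordered list of index pairs (a at position i, b at position z > i) both sides traverse
def pairsOf : List Char → List (Char × Char)
  | [] => []
  | a :: rest => rest.map (fun b => (a, b)) ++ pairsOf rest

-- the step of A's loop body, seen over one candidate pair string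
def stepA (st : List Int × Int) (p : String) : List Int × Int :=
  if p = "TT" then st
  else (st.1 ++ [st.2 * 15 + pairDict.getD p 0], st.2 + 1)

-- core invariant: folding stepA over any pair list from (acc, n) appends exactly
-- the enumerate-map of the filtered list, started at n.
theorem stepA_foldl (C : List String) (acc : List Int) (n : Int) :
    C.foldl stepA (acc, n) =
      (acc ++ (PySem.List.enumerate (C.filter (fun p => p ≠ "TT")) n).map
          (fun kp => kp.1 * 15 + pairDict.getD kp.2 0),
       n + (C.filter (fun p => p ≠ "TT")).length) := by
  induction C generalizing acc n with
  | nil => simp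
  | cons p C ih =>
    by_cases hp : p = "TT"
    · simp [stepA, hp, ih]
    · simp only [List.foldl_cons, stepA, hp, if_neg, List.filter_cons,
        decide_not, ne_eq, not_false_iff, decide_true, Bool.not_false,
        if_true, PySem.List.enumerate_cons, List.map_cons, List.length_cons]
      rw [ih]
      simp [List.append_assoc]
      push_cast; ring
  termination_by C.length

-- a foldl over a flatMap is the nested foldl
theorem foldl_flatMap {α β σ : Type} (l : List α) (g : α → List β)
    (f : σ → β → σ) (init : σ) :
    (l.flatMap g).foldl f init = l.foldl (fun s a => (g a).foldl f s) init := by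
  induction l generalizing init with
  | nil => simp
  | cons a l ih => simp [List.flatMap_cons, List.foldl_append, ih]

-- A's candidate pairs (drop-slices under enumerate) are pairsOf, as pair strings
theorem flatMap_enumerate_pairs (pre l : List Char) :
    (PySem.List.enumerate l (pre.length : Int)).flatMap
        (fun ib => ((pre ++ l).drop (ib.1 + 1).toNat).map (fun b => String.ofList [ib.2, b]))
      = (pairsOf l).map (fun ab => String.ofList [ab.1, ab.2]) := by
  induction l generalizing pre with
  | nil => simp [pairsOf]
  | cons a l ih =>
    rw [PySem.List.enumerate_cons]
    simp only [List.flatMap_cons, pairsOf, List.map_append, List.map_map]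
    congr 1
    · have h0 : ((pre.length : Int) + 1).toNat = pre.length + 1 := by omega
      rw [h0]
      have h1 : (pre ++ a :: l).drop (pre.length + 1) = l := by
        rw [show pre ++ a :: l = (pre ++ [a]) ++ l by simp, List.drop_append_of_le_length (by simp)]
        simp
      rw [h1]; rfl
    · have h1 : ((pre.length : Int) + 1) = (((pre ++ [a]).length : Nat) : Int) := by
        push_cast [List.length_append, List.length_cons, List.length_nil]; ring
      have h2 : pre ++ a :: l = (pre ++ [a]) ++ l := by simp
      rw [h1, h2, ih (pre ++ [a])]

-- altCodes is pairsOf mapped through the arithmetic code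
theorem altCodes_eq_pairs (l : List Char) :
    altCodes l = (pairsOf l).map (fun ab => baseDict.getD ab.1 0 * 4 + baseDict.getD ab.2 0) := by
  induction l with
  | nil => rfl
  | cons a l ih => simp [altCodes, pairsOf, ih, List.map_map]

-- a list of length at most 1 has no pairs
theorem pairsOf_short : ∀ (l : List Char), l.length ≤ 1 → pairsOf l = []
  | [], _ => rfl
  | [_], _ => rfl
  | _ :: _ :: _, h => by simp at h

-- members of pairsOf are pairs of members of l
theorem mem_pairsOf {l : List Char} {ab : Char × Char} (h : ab ∈ pairsOf l) :
    ab.1 ∈ l ∧ ab.2 ∈ l := by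
  induction l with
  | nil => simp [pairsOf] at h
  | cons a l ih =>
    simp only [pairsOf, List.mem_append, List.mem_map] at h
    rcases h with ⟨b, hb, rfl⟩ | h
    · exact ⟨by simp, by simp [hb]⟩
    · rcases ih h with ⟨h1, h2⟩
      exact ⟨by simp [h1], by simp [h2]⟩

theorem acgt_cases {c : Char}
    (h : (c == 'A' || c == 'C' || c == 'G' || c == 'T') = true) :
    c = 'A' ∨ c = 'C' ∨ c = 'G' ∨ c = 'T' := by
  simp only [Bool.or_eq_true, beq_iff_eq] at h
  tauto

-- on ACGT characters the skipped pair 'TT' is exactly code 15, and on every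
-- other pair the pair-dict value is the base-4 arithmetic code
theorem pair_code_eq {a b : Char}
    (ha : a = 'A' ∨ a = 'C' ∨ a = 'G' ∨ a = 'T')
    (hb : b = 'A' ∨ b = 'C' ∨ b = 'G' ∨ b = 'T') :
    ((String.ofList [a, b] = "TT") ↔ (baseDict.getD a 0 * 4 + baseDict.getD b 0 = 15)) ∧
      (String.ofList [a, b] ≠ "TT" →
        pairDict.getD (String.ofList [a, b]) 0 = baseDict.getD a 0 * 4 + baseDict.getD b 0) := by
  rcases ha with rfl | rfl | rfl | rfl <;> rcases hb with rfl | rfl | rfl | rfl <;>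
    exact ⟨by decide, by decide⟩

-- enumerate commutes with map on the payload
theorem enumerate_map {α β : Type} (f : α → β) (l : List α) (n : Int) :
    PySem.List.enumerate (l.map f) n = (PySem.List.enumerate l n).map (fun kv => (kv.1, f kv.2)) := by
  induction l generalizing n with
  | nil => simp
  | cons a l ih => simp [PySem.List.enumerate_cons, ih]

-- filter commutes with map
theorem filter_map' {α β : Type} (f : α → β) (p : β → Bool) (l : List α) :
    (l.map f).filter p = (l.filter (fun a => p (f a))).map f := by
  induction l with
  | nil => rfl
  | cons a l ih => by_cases h : p (f a) <;> simp [h, ih]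

theorem seq2mat2_spec : Claim_equal_seq2mat2 := by
  intro seq _ hpre
  unfold Spec_seq2mat2 seq2mat2 seq2mat2_alt
  simp only []
  set l := seq.toList with hl
  set G : Int × Char → List String :=
    fun ib => (l.drop (ib.1 + 1).toNat).map (fun b => String.ofList [ib.2, b]) with hG
  have hnn : ∀ p ∈ PySem.List.enumerate l 0, 0 ≤ p.1 := by
    intro p hp
    rcases (PySem.List.mem_enumerate_iff _ _ _).mp hp with ⟨k, hk, rfl⟩
    simp
  -- A side: inner pyRange/pyGetD loop is a stepA-fold over G ib
  have hA : (PySem.List.enumerate l).foldl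
      (fun (st : List Int × Int) ib =>
        (PySem.List.pyRange (ib.1 + 1) ((l.length : Int)) 1).foldl
          (fun (st : List Int × Int) z =>
            let pr := String.ofList [ib.2, PySem.List.pyGetD l z ' ']
            if pr = "TT" then st
            else (st.1 ++ [st.2 * 15 + pairDict.getD pr 0], st.2 + 1))
          st)
      ([], 0)
    = (PySem.List.enumerate l).foldl (fun st ib => (G ib).foldl stepA st) ([], 0) := by
    apply PySem.List.foldl_congr_mem
    intro st ib hib
    have h0 : (0:Int) ≤ ib.1 := hnn ib hib
    have hrange := PySem.List.foldl_pyRange_pyGetD' (xs := l) (a := ib.1 + 1) (d := ' ')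
      (f := fun (st : List Int × Int) (b : Char) => stepA st (String.ofList [ib.2, b]))
      (init := st) (by omega)
    rw [hG]
    simp only []
    rw [List.foldl_map, ← hrange]
    rfl
  rw [hA, ← foldl_flatMap]
  have hGP : (PySem.List.enumerate l).flatMap G
      = (pairsOf l).map (fun ab => String.ofList [ab.1, ab.2]) := by
    have := flatMap_enumerate_pairs [] l
    simpa [hG] using this
  -- per-pair facts from Pre_
  have hmem : ∀ ab ∈ pairsOf l,
      ((String.ofList [ab.1, ab.2] = "TT")
          ↔ (baseDict.getD ab.1 0 * 4 + baseDict.getD ab.2 0 = 15)) ∧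
        (String.ofList [ab.1, ab.2] ≠ "TT" →
          pairDict.getD (String.ofList [ab.1, ab.2]) 0
            = baseDict.getD ab.1 0 * 4 + baseDict.getD ab.2 0) := by
    intro ab hab
    unfold Pre_seq2mat2 at hpre
    rw [Bool.or_eq_true] at hpre
    rw [← hl] at hpre
    rcases hpre with hlen | hall
    · exfalso
      have hlen' : l.length ≤ 1 := by simpa using hlen
      rw [pairsOf_short l hlen'] at hab
      simp at hab
    · rw [List.all_eq_true] at hall
      rcases mem_pairsOf hab with ⟨h1, h2⟩
      exact pair_code_eq (acgt_cases (hall _ h1)) (acgt_cases (hall _ h2))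
  rw [hGP, stepA_foldl, altCodes_eq_pairs]
  simp only [List.nil_append]
  rw [filter_map', filter_map', enumerate_map, enumerate_map, List.map_map, List.map_map]
  have hfil : (pairsOf l).filter
        (fun ab => decide ¬(String.ofList [ab.1, ab.2] = "TT"))
      = (pairsOf l).filter
        (fun ab => decide ¬(baseDict.getD ab.1 0 * 4 + baseDict.getD ab.2 0 = 15)) := by
    apply List.filter_congr
    intro ab hab
    simp [(hmem ab hab).1]
  simp only [ne_eq] at hfil ⊢
  rw [hfil]
  apply List.map_congr_left
  intro kab hkab
  rcases (PySem.List.mem_enumerate_iff _ _ _).mp hkab with ⟨k, hk, rfl⟩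
  have h2 := List.mem_filter.mp (List.getElem_mem hk)
  have hcode : ¬ (baseDict.getD ((pairsOf l).filter
      (fun ab => decide ¬(baseDict.getD ab.1 0 * 4 + baseDict.getD ab.2 0 = 15)))[k].1 0 * 4
      + baseDict.getD ((pairsOf l).filter
      (fun ab => decide ¬(baseDict.getD ab.1 0 * 4 + baseDict.getD ab.2 0 = 15)))[k].2 0 = 15) := by
    simpa using h2.2
  have hne := fun h => hcode (((hmem _ h2.1).1).mp h)
  have heq := (hmem _ h2.1).2 hne
  simp only [decide_not] at heq
  simp [heq]
  ring
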